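-- pv_equiv track=rewrite | github.com/Vancouver-wen/Multi-Camera-Calibration | collect/MultiViewCapture.py | can_distinguish_cam_byid
-- ===== SOURCE A (Python) =====
-- def can_distinguish_cam_byid(camid_maps):
--     ids=[]
--     for camid_map in camid_maps:
--         if camid_map['vid']==None or camid_map['pid']==None:
--             return False
--         ids.append(camid_map['vid']+camid_map['pid'])
--     ids=list(set(ids))
--     if len(ids)==len(camid_maps):
--         return True
--     else:
--         return False
-- ===== SOURCE B (Python) =====
-- def can_distinguish_cam_byid(camid_maps):
--     if any(m['vid'] is None or m['pid'] is None for m in camid_maps):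
--         return False
--     ids = sorted(m['vid'] + m['pid'] for m in camid_maps)
--     return all(a != b for a, b in zip(ids, ids[1:]))
-- ===== Notes on version B (the rewrite author's own statement) =====
-- stated objective: alternative
-- what changed: B replaces A's single accumulate-then-dedup loop with two staged passes: an any() scan that rejects on the first None vid/pid, then sorting the concatenated ids and detecting duplicates by comparing adjacent sorted entries instead of a set-size/length comparison.
import Mathlib
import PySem

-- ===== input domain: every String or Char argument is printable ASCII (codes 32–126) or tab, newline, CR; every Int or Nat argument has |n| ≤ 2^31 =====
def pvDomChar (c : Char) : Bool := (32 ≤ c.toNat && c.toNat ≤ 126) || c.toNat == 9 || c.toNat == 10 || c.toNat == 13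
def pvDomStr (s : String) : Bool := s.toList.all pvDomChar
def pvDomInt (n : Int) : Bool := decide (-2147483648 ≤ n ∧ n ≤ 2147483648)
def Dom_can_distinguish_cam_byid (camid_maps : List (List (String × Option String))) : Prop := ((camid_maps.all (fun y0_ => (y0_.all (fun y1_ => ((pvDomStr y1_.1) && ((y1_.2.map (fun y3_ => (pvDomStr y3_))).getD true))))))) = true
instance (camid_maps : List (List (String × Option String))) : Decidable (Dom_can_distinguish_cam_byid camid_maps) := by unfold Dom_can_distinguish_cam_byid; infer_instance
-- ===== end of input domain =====

-- B replaces A's accumulate-then-dedup loop by staged passes: extract vid/pid lists, reject on any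
-- None, then sort the concatenated ids and compare adjacent entries (objective: alternative).

-- m.get(k): first-match lookup; a missing key and a stored None both give none
def pvGetKey : List (String × Option String) → String → Option String
  | [], _ => none
  | (k', v) :: t, k => if k' == k then v else pvGetKey t k

-- ===== PORT A =====
-- A's loop: append vid+pid to ids, early False on a None value; at the end,
-- ids = list(set(ids)) and len(ids) == len(camid_maps).  A missing key — where Python A raises
-- KeyError and returns nothing — is totalised to False here, the value B returns there.
def pvALoop (ms : List (List (String × Option String))) (ids : List String) (n : Nat) : Bool :=
  match ms with
  | [] => decide ((PySem.Set.ofList ids).length = n)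
  | m :: t =>
    match pvGetKey m "vid", pvGetKey m "pid" with
    | some v, some p => pvALoop t (ids ++ [v ++ p]) n
    | _, _ => false

def can_distinguish_cam_byid (camid_maps : List (List (String × Option String))) : Bool :=
  pvALoop camid_maps [] camid_maps.length

-- ===== PORT B =====
-- transliteration of Source B.  m['vid'] where the key is missing is Python's KeyError: as in port A
-- it is totalised through pvGetKey (none) — the any-test then yields False; Pre_ excludes those
-- inputs.  The '.getD ""' in the ids comprehension is only evaluated after the any-test has
-- failed, where every lookup is some, so it is exact.
def can_distinguish_cam_byid_alt (camid_maps : List (List (String × Option String))) : Bool :=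
  if camid_maps.any (fun m => (pvGetKey m "vid").isNone || (pvGetKey m "pid").isNone) then false
  else
    let ids := PySem.List.sorted (camid_maps.map (fun m => (pvGetKey m "vid").getD "" ++ (pvGetKey m "pid").getD "")) (fun x => x) false
    (ids.zip (ids.drop 1)).all (fun ab => ab.1 != ab.2)

-- ===== PRECONDITION & SPEC =====
-- map i is fully usable: both keys present with non-None values (A's loop continues past it)
def pvOkMap (m : List (String × Option String)) : Bool :=
  ((m.lookup "vid").getD none).isSome && ((m.lookup "pid").getD none).isSome
-- A's access pattern at a reached map does not raise: 'vid' key present, and — since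
-- `m['vid']==None or m['pid']==None` short-circuits — 'pid' key present unless vid is None
def pvStepOk (m : List (String × Option String)) : Bool :=
  (m.map Prod.fst).contains "vid" &&
    (((m.lookup "vid").getD none).isNone || (m.map Prod.fst).contains "pid")

-- Exactly the inputs where Python A returns normally: every map the loop actually reaches
-- (all earlier maps fully usable) can be accessed without KeyError; elsewhere A raises.
def Pre_can_distinguish_cam_byid (camid_maps : List (List (String × Option String))) : Prop :=
  ∀ i < camid_maps.length, (∀ j < i, pvOkMap (camid_maps.getD j []) = true) →
    pvStepOk (camid_maps.getD i []) = true
instance (camid_maps : List (List (String × Option String))) : Decidable (Pre_can_distinguish_cam_byid camid_maps) := by unfold Pre_can_distinguish_cam_byid; infer_instance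

def pvWitness_can_distinguish_cam_byid : (List (List (String × Option String))) :=
  [[("vid", some "a"), ("pid", some "b")], [("vid", some "c"), ("pid", some "d")]]

def Spec_can_distinguish_cam_byid (camid_maps : List (List (String × Option String))) (out : Bool) : Prop := out = can_distinguish_cam_byid_alt camid_maps
instance (camid_maps : List (List (String × Option String))) (out : Bool) : Decidable (Spec_can_distinguish_cam_byid camid_maps out) := by unfold Spec_can_distinguish_cam_byid; infer_instance

-- ===== CLAIM (what is proved, stated in full; the proofs are below) =====
def Claim_equal_can_distinguish_cam_byid : Prop := ∀ (camid_maps : List (List (String × Option String))), Dom_can_distinguish_cam_byid camid_maps → Pre_can_distinguish_cam_byid camid_maps → Spec_can_distinguish_cam_byid camid_maps (can_distinguish_cam_byid camid_maps)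

-- ===== LEMMAS AND PROOFS =====

-- the id A appends for a good map
def pvId (m : List (String × Option String)) : String :=
  (pvGetKey m "vid").getD "" ++ (pvGetKey m "pid").getD ""

-- if some map in ms yields a None vid or pid, A's loop returns false
lemma pvALoop_bad (ms : List (List (String × Option String))) (ids : List String) (n : Nat)
    (h : ∃ m ∈ ms, pvGetKey m "vid" = none ∨ pvGetKey m "pid" = none) :
    pvALoop ms ids n = false := by
  induction ms generalizing ids with
  | nil => simp at h
  | cons m t ih =>
    simp only [pvALoop]
    rcases h with ⟨m', hm', hbad⟩
    rcases List.mem_cons.mp hm' with rfl | hmem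
    · rcases hbad with h1 | h1 <;> rw [h1]; cases pvGetKey m' "vid" <;> cases pvGetKey m' "pid" <;> rfl
    · cases hv : pvGetKey m "vid" with
      | none => rfl
      | some v =>
        cases hp : pvGetKey m "pid" with
        | none => rfl
        | some p => exact ih _ ⟨m', hmem, hbad⟩

-- if every map in ms is good, A's loop appends exactly the pvId of each map
lemma pvALoop_good (ms : List (List (String × Option String))) (ids : List String) (n : Nat)
    (h : ∀ m ∈ ms, (pvGetKey m "vid").isSome ∧ (pvGetKey m "pid").isSome) :
    pvALoop ms ids n = decide ((PySem.Set.ofList (ids ++ ms.map pvId)).length = n) := by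
  induction ms generalizing ids with
  | nil => simp [pvALoop]
  | cons m t ih =>
    have hm := h m (List.mem_cons_self ..)
    simp only [pvALoop]
    cases hv : pvGetKey m "vid" with
    | none => simp [hv] at hm
    | some v =>
      cases hp : pvGetKey m "pid" with
      | none => simp [hp] at hm
      | some p =>
        dsimp only
        rw [ih _ (fun m' hm' => h m' (List.mem_cons_of_mem _ hm'))]
        have : ids ++ [v ++ p] ++ t.map pvId = ids ++ (m :: t).map pvId := by
          simp [pvId, hv, hp]
        rw [this]

-- B returns false as soon as some map yields a None vid or pid
lemma pvAlt_bad (ms : List (List (String × Option String)))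
    (h : ∃ m ∈ ms, pvGetKey m "vid" = none ∨ pvGetKey m "pid" = none) :
    can_distinguish_cam_byid_alt ms = false := by
  unfold can_distinguish_cam_byid_alt
  rw [if_pos]
  rcases h with ⟨m, hm, h | h⟩ <;>
    exact List.any_eq_true.mpr ⟨m, hm, by simp [h]⟩

-- with no None anywhere, B sorts the pvId list and tests adjacent pairs
lemma pvAlt_good (ms : List (List (String × Option String)))
    (h : ∀ m ∈ ms, pvGetKey m "vid" ≠ none ∧ pvGetKey m "pid" ≠ none) :
    can_distinguish_cam_byid_alt ms =
      (let s := PySem.List.sorted (ms.map pvId) (fun x => x) false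
       (s.zip (s.drop 1)).all (fun ab => ab.1 != ab.2)) := by
  unfold can_distinguish_cam_byid_alt
  rw [if_neg]
  · rfl
  · rw [List.any_eq_true]
    rintro ⟨m, hm, hb⟩
    rcases Bool.or_eq_true_iff.mp hb with hb | hb <;>
      [exact (h m hm).1 (Option.isNone_iff_eq_none.mp hb);
       exact (h m hm).2 (Option.isNone_iff_eq_none.mp hb)]

-- a strict-length dedup: a duplicated list loses length under set()
lemma pvSet_len_lt {ids : List String} (h : ¬ ids.Nodup) :
    (PySem.Set.ofList ids).length < ids.length := by
  induction ids with
  | nil => simp at h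
  | cons x t ih =>
    rw [PySem.Set.ofList_cons]
    simp only [List.length_cons]
    by_cases hx : x ∈ t
    · have h1 : ((PySem.Set.ofList t).discard x).length < (PySem.Set.ofList t).length := by
        apply List.length_filter_lt_length_iff_exists.mpr
        exact ⟨x, (PySem.Set.mem_ofList t x).mpr hx, by simp⟩
      have h2 := PySem.Set.length_ofList_le t
      omega
    · have ht : ¬ t.Nodup := by simpa [List.nodup_cons, hx] using h
      have h1 : ((PySem.Set.ofList t).discard x).length ≤ (PySem.Set.ofList t).length :=
        List.length_filter_le _ _
      have h2 := ih ht
      omega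

-- set(ids) has the length of ids iff ids has no duplicates
lemma pvSetLen_eq_iff (ids : List String) :
    (PySem.Set.ofList ids).length = ids.length ↔ ids.Nodup := by
  constructor
  · intro h
    by_contra hnd
    exact absurd h (Nat.ne_of_lt (pvSet_len_lt hnd))
  · intro h
    rw [PySem.Set.ofList_eq_self_of_nodup ids h]

-- on a ≤-sorted list, all adjacent pairs distinct iff no duplicates at all
lemma pvAdjAll_eq (s : List String) (hs : s.Pairwise (· ≤ ·)) :
    ((s.zip (s.drop 1)).all (fun ab => ab.1 != ab.2)) = decide s.Nodup := by
  induction s with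
  | nil => simp
  | cons a t ih =>
    cases t with
    | nil => simp
    | cons b t' =>
      have hpair := List.pairwise_cons.mp hs
      have hab : a ≤ b := hpair.1 b (List.mem_cons_self ..)
      have hzg : ((a :: b :: t').zip ((a :: b :: t').drop 1)) =
          (a, b) :: ((b :: t').zip ((b :: t').drop 1)) := by simp
      rw [hzg, List.all_cons, ih hpair.2]
      by_cases hne : a = b
      · subst hne
        simp [List.nodup_cons]
      · have ha_notin : a ∉ b :: t' := by
          intro hmem
          rcases List.mem_cons.mp hmem with rfl | hmem'
          · exact hne rfl
          · exact hne (le_antisymm hab ((List.pairwise_cons.mp hpair.2).1 a hmem'))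
        simp [List.nodup_cons, hne, ha_notin]

-- ===== VERDICT (by name: the statement is the Claim_ definition above) =====
theorem can_distinguish_cam_byid_spec : Claim_equal_can_distinguish_cam_byid := by
  intro ms _ _
  unfold Spec_can_distinguish_cam_byid can_distinguish_cam_byid
  by_cases hbad : ∃ m ∈ ms, pvGetKey m "vid" = none ∨ pvGetKey m "pid" = none
  · rw [pvALoop_bad _ _ _ hbad]
    rcases hbad with ⟨m, hm, hcase⟩
    exact (pvAlt_bad ms ⟨m, hm, hcase⟩).symm
  · push Not at hbad
    have hgood : ∀ m ∈ ms, (pvGetKey m "vid").isSome ∧ (pvGetKey m "pid").isSome := by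
      intro m hm
      exact ⟨Option.isSome_iff_ne_none.mpr (hbad m hm).1,
             Option.isSome_iff_ne_none.mpr (hbad m hm).2⟩
    rw [pvALoop_good _ _ _ hgood, pvAlt_good ms hbad]
    dsimp only
    rw [pvAdjAll_eq _ (by simpa using PySem.List.sorted_pairwise (ms.map pvId) (fun x => x)),
        decide_eq_decide, List.nil_append]
    have h1 := pvSetLen_eq_iff (ms.map pvId)
    rw [List.length_map] at h1
    exact h1.trans (PySem.List.sorted_perm (ms.map pvId) (fun x => x) false).nodup_iff.symm
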